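-- pv_equiv track=rewrite | github.com/KavyaChopra04/COL100 | Assignment_5/2021CS10081/2021CS10081-q4.py | numwords
-- ===== SOURCE A (Python) =====
-- def valid(c):
-- 	if((c>='a' and c<='z') or (c>='A' and c<='Z')):
-- 		return True
-- 	else:
-- 		return False
--
-- def numwords(l):
-- 	minwords=len(l[0]);
-- 	for s in l:
-- 		n=len(s)
-- 		i=0
-- 		wor=0
-- 		while(i<n):
-- 			fv=False;
-- 			while(i<n and valid(s[i])):
-- 				fv=True
-- 				i+=1
-- 			if(fv):
-- 				wor+=1
-- 			else:
-- 				i+=1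
-- 		minwords=min(minwords, wor)
-- 	return minwords
-- ===== SOURCE B (Python) =====
-- def valid(c):
-- 	if((c>='a' and c<='z') or (c>='A' and c<='Z')):
-- 		return True
-- 	else:
-- 		return False
--
-- def numwords(l):
-- 	# minimum word count: count word *starts* (a letter not preceded by a letter)
-- 	# in one flat pass per string, then take the min.
-- 	return min(sum(1 for p, c in zip(' ' + s, s) if valid(c) and not valid(p))
-- 	           for s in l)
-- ===== Notes on version B (the rewrite author's own statement) =====
-- stated objective: simpler
-- what changed: Replaces the nested while-loop run-consuming state machine with a single flat pass per string that counts word starts (a letter not preceded by a letter) via zip(' '+s, s), and takes min() over the per-string counts instead of threading a running minimum seeded with len(l[0]).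
import Mathlib
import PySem

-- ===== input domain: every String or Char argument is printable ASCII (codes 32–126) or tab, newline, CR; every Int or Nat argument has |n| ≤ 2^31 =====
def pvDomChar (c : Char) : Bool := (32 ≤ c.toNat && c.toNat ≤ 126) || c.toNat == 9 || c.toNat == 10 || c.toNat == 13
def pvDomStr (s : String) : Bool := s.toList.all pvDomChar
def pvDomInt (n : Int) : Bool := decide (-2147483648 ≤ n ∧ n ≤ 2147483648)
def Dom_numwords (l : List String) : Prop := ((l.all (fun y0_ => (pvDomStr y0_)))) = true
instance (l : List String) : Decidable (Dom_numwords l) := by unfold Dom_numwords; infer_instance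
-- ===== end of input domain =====

-- B replaces A's nested while-loop word scanner with a flat word-start count per
-- string and a plain min over the list (objective: simpler).

-- ===== PORT A =====
def validA (c : Char) : Bool := (('a' ≤ c && c ≤ 'z') || ('A' ≤ c && c ≤ 'Z'))

-- inner while: consume letters, remembering in fv whether any was consumed
def innerA : List Char → Bool → List Char × Bool
  | [], fv => ([], fv)
  | c :: rest, fv => if validA c then innerA rest true else (c :: rest, fv)

theorem innerA_len (cs : List Char) (fv : Bool) : (innerA cs fv).1.length ≤ cs.length := by
  induction cs generalizing fv with
  | nil => simp [innerA]
  | cons c rest ih =>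
    simp only [innerA]
    split
    · exact Nat.le_trans (ih true) (Nat.le_succ _)
    · simp

-- outer while over the remaining characters (index i ↦ the suffix of s from i)
def outerA : List Char → Int → Int
  | [], wor => wor
  | c :: rest, wor =>
    if (innerA (c :: rest) false).2 then outerA (innerA (c :: rest) false).1 (wor + 1)
    else outerA rest wor
termination_by cs _ => cs.length
decreasing_by
  · by_cases h : validA c
    · simp only [innerA, h, if_pos]
      exact Nat.lt_succ_of_le (innerA_len rest true)
    · simp [innerA, h] at *
  · simp

def numwords (l : List String) : Int :=
  let minwords : Int := ((l.headD "").toList.length : Int)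
  l.foldl (fun mw s => min mw (outerA s.toList 0)) minwords

-- ===== PORT B =====
def wordStarts (s : String) : Int :=
  (((' ' :: s.toList).zip s.toList).filter (fun pc => validA pc.2 && !validA pc.1)).length

def numwords_alt (l : List String) : Int :=
  (PySem.List.min? (l.map (fun s => wordStarts s)) (fun x => x)).getD 0

-- ===== PRECONDITION & SPEC =====
-- A evaluates l[0] first: on the empty list A raises IndexError (and B raises ValueError).
def Pre_numwords (l : List String) : Prop := l ≠ []
instance (l : List String) : Decidable (Pre_numwords l) := by unfold Pre_numwords; infer_instance
def pvWitness_numwords : List String := (["hi there", ""])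
def Spec_numwords (l : List String) (out : Int) : Prop := out = numwords_alt l
instance (l : List String) (out : Int) : Decidable (Spec_numwords l out) := by unfold Spec_numwords; infer_instance

-- ===== CLAIM (what is proved, stated in full; the proofs are below) =====
def Claim_equal_numwords : Prop := ∀ (l : List String), Dom_numwords l → Pre_numwords l → Spec_numwords l (numwords l)

-- ===== LEMMAS AND PROOFS =====

-- word-start counter with the validity of the previous character as state
def starts : Bool → List Char → Nat
  | _, [] => 0
  | pv, c :: rest => (if validA c && !pv then 1 else 0) + starts (validA c) rest

theorem innerA_fst (cs : List Char) (fv : Bool) : (innerA cs fv).1 = cs.dropWhile validA := by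
  induction cs generalizing fv with
  | nil => simp [innerA]
  | cons c rest ih => by_cases h : validA c <;> simp [innerA, List.dropWhile, h, ih]

theorem starts_true_drop (cs : List Char) : starts true cs = starts false (cs.dropWhile validA) := by
  induction cs with
  | nil => simp [starts, List.dropWhile]
  | cons c rest ih =>
    by_cases h : validA c <;> simp [starts, List.dropWhile, h, ih]

theorem innerA_snd_true (cs : List Char) : (innerA cs true).2 = true := by
  induction cs with
  | nil => simp [innerA]
  | cons c rest ih => by_cases h : validA c <;> simp [innerA, h, ih]

theorem outerA_eq_starts_aux : ∀ (n : Nat) (cs : List Char), cs.length ≤ n →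
    ∀ wor : Int, outerA cs wor = wor + starts false cs := by
  intro n
  induction n with
  | zero =>
    intro cs hcs wor
    have : cs = [] := List.eq_nil_of_length_eq_zero (Nat.le_zero.mp hcs)
    simp [this, outerA, starts]
  | succ n ih =>
    intro cs hcs wor
    match cs with
    | [] => simp [outerA, starts]
    | c :: rest =>
      rw [outerA]
      by_cases h : validA c
      · have h2 : innerA (c :: rest) false = innerA rest true := by simp [innerA, h]
        rw [h2, innerA_snd_true, if_pos rfl, innerA_fst]
        have hlen : (rest.dropWhile validA).length ≤ n := by
          have := List.length_dropWhile_le validA rest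
          simp at hcs; omega
        rw [ih _ hlen, starts, ← starts_true_drop]
        simp [h]; ring
      · have h2 : innerA (c :: rest) false = (c :: rest, false) := by simp [innerA, h]
        rw [h2]
        simp only [if_neg Bool.false_ne_true]
        have hlen : rest.length ≤ n := by simp at hcs; omega
        rw [ih _ hlen, starts]
        simp [h]

theorem outerA_eq_starts (cs : List Char) (wor : Int) :
    outerA cs wor = wor + starts false cs :=
  outerA_eq_starts_aux cs.length cs le_rfl wor

theorem zip_starts (p : Char) (cs : List Char) :
    (((p :: cs).zip cs).filter (fun pc => validA pc.2 && !validA pc.1)).length = starts (validA p) cs := by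
  induction cs generalizing p with
  | nil => simp [starts]
  | cons c rest ih =>
    simp only [List.zip_cons_cons, List.filter, starts]
    by_cases h : validA c && !validA p <;> simp [h, ih] <;> omega

theorem starts_le_len (pv : Bool) (cs : List Char) : starts pv cs ≤ cs.length := by
  induction cs generalizing pv with
  | nil => simp [starts]
  | cons c rest ih =>
    simp only [starts, List.length_cons]
    have := ih (validA c)
    split <;> omega

theorem wordStarts_eq (s : String) : wordStarts s = (starts false s.toList : Nat) := by
  have : validA ' ' = false := by decide
  simp [wordStarts, ← this, zip_starts]

-- ===== VERDICT (by name: the statement is the Claim_ definition above) =====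
theorem numwords_spec : Claim_equal_numwords := by
  intro l _ hpre
  unfold Spec_numwords
  match l with
  | [] => exact absurd rfl hpre
  | s0 :: rest =>
    unfold numwords numwords_alt
    simp only [List.map_cons, PySem.List.min?_id_cons, Option.getD_some, List.headD_cons,
      List.foldl_cons]
    have hseed : min ((s0.toList.length : Int)) (outerA s0.toList 0) = wordStarts s0 := by
      rw [outerA_eq_starts, wordStarts_eq, zero_add]
      exact min_eq_right (by exact_mod_cast starts_le_len false s0.toList)
    rw [hseed]
    have : ∀ (t : List String) (acc : Int),
        t.foldl (fun mw s => min mw (outerA s.toList 0)) acc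
          = (t.map (fun s => wordStarts s)).foldl min acc := by
      intro t
      induction t with
      | nil => intro acc; simp
      | cons x xs ih =>
        intro acc
        simp only [List.foldl_cons, List.map_cons]
        rw [ih]
        congr 1
        rw [outerA_eq_starts, wordStarts_eq]; simp
    rw [this]
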